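-- pv_equiv track=rewrite | github.com/saubhik/leetcode | problems/four_sum_ii.py | nSumCount
-- ===== SOURCE A (Python) =====
-- from typing import List
--
-- def nSumCount(lists: List[List[int]]) -> int:
--     k = len(lists)
--     partial_sums = dict()
--
--     def addToHash(start: int, end: int, partial_sum: int = 0) -> None:
--         if start == end:
--             partial_sums[partial_sum] = partial_sums.get(partial_sum, 0) + 1
--             return
--         for elem in lists[start]:
--             addToHash(start=start + 1, end=end, partial_sum=partial_sum + elem)
--
--     def countComplements(start: int, end: int, partial_sum: int = 0) -> int:
--         if start == end:
--             return partial_sums.get(-partial_sum, 0)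
--         count = 0
--         for elem in lists[start]:
--             count += countComplements(
--                 start=start + 1, end=end, partial_sum=partial_sum + elem
--             )
--         return count
--
--     mid = k // 2
--     addToHash(start=0, end=mid)
--     return countComplements(start=mid, end=k)
-- ===== SOURCE B (Python) =====
-- from typing import List
-- from itertools import product
-- from collections import Counter
--
--
-- def nSumCount(lists: List[List[int]]) -> int:
--     mid = len(lists) // 2
--     counts = Counter(sum(combo) for combo in product(*lists[:mid]))
--     return sum(counts.get(-sum(combo), 0) for combo in product(*lists[mid:]))
-- ===== Notes on version B (the rewrite author's own statement) =====
-- stated objective: idiomatic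
-- what changed: Replaces the two index-based recursive helpers with flat itertools.product enumeration of each half's Cartesian product and a collections.Counter of the first half's sums.
import Mathlib
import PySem

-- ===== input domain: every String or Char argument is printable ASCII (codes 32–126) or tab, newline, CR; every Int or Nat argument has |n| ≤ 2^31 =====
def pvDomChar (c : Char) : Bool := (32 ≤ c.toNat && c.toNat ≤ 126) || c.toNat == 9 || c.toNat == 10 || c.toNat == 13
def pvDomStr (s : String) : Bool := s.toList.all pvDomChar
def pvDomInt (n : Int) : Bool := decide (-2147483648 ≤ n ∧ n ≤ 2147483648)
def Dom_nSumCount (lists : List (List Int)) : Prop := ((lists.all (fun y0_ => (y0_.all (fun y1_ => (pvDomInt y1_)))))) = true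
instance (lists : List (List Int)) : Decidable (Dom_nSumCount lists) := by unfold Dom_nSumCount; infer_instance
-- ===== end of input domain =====

-- B replaces A's two recursive index-walking helpers by flat Cartesian-product enumeration of
-- the two halves plus a Counter of the first half's sums (idiomatic; same asymptotic cost).

-- ===== PORT A =====
-- addToHash: indices are Nat (all calls keep 0 ≤ start ≤ end ≤ len(lists), so 'start ≥ e'
-- coincides with Python's 'start == end', and lists[start]? is always some; '.getD []' is
-- never the default on reachable calls).  partial_sums is threaded explicitly.
def addToHash (lists : List (List Int)) (start e : Nat) (ps : Int)
    (d : PySem.Dict Int Int) : PySem.Dict Int Int :=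
  if start ≥ e then d.insert ps (d.getD ps 0 + 1)
  else (lists[start]?.getD []).foldl
    (fun acc elem => addToHash lists (start + 1) e (ps + elem) acc) d
termination_by e - start
decreasing_by omega

def countComplements (lists : List (List Int)) (start e : Nat) (ps : Int)
    (d : PySem.Dict Int Int) : Int :=
  if start ≥ e then d.getD (-ps) 0
  else (lists[start]?.getD []).foldl
    (fun count elem => count + countComplements lists (start + 1) e (ps + elem) d) 0
termination_by e - start
decreasing_by omega

def nSumCount (lists : List (List Int)) : Int :=
  let k := lists.length
  let mid := k / 2          -- k ≥ 0, so Nat '/' is exactly Python's 'k // 2'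
  let partial_sums := addToHash lists 0 mid 0 PySem.Dict.empty
  countComplements lists mid k 0 partial_sums

-- ===== PORT B =====
-- sums of the tuples of itertools.product(*ls), in product's lexicographic order
def prodSums (ls : List (List Int)) : List Int :=
  ls.foldr (fun l acc => l.flatMap (fun e => acc.map (fun s => e + s))) [0]

def nSumCount_alt (lists : List (List Int)) : Int :=
  let mid := lists.length / 2
  let counts := PySem.Dict.counter (prodSums (lists.take mid))
  (prodSums (lists.drop mid)).foldl (fun acc s => acc + counts.getD (-s) 0) 0

-- ===== PRECONDITION & SPEC =====
def Spec_nSumCount (lists : List (List Int)) (out : Int) : Prop := out = nSumCount_alt lists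
instance (lists : List (List Int)) (out : Int) : Decidable (Spec_nSumCount lists out) := by unfold Spec_nSumCount; infer_instance

-- ===== CLAIM (what is proved, stated in full; the proofs are below) =====
def Claim_equal_nSumCount : Prop := ∀ (lists : List (List Int)), Dom_nSumCount lists → Spec_nSumCount lists (nSumCount lists)

-- ===== LEMMAS AND PROOFS =====

lemma foldl_flatMap {α β γ : Type} (l : List α) (f : α → List β) (g : γ → β → γ)
    (init : γ) : (l.flatMap f).foldl g init = l.foldl (fun a x => (f x).foldl g a) init := by
  induction l generalizing init with
  | nil => rfl
  | cons x xs ih => simp [List.foldl_append, ih]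

lemma sum_flatMap' (l : List Int) (f : Int → List Int) :
    (l.flatMap f).sum = (l.map (fun x => (f x).sum)).sum := by
  induction l with
  | nil => rfl
  | cons x xs ih => simp [ih]

lemma sub_cons (lists : List (List Int)) (start n : Nat)
    (h : start < lists.length) :
    (lists.drop start).take (n + 1)
      = lists[start] :: (lists.drop (start + 1)).take n := by
  rw [List.drop_eq_getElem_cons h, List.take_succ_cons]

lemma prodSums_cons (l : List Int) (ls : List (List Int)) :
    prodSums (l :: ls) = l.flatMap (fun e => (prodSums ls).map (fun s => e + s)) := rfl

lemma addToHash_eq (lists : List (List Int)) :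
    ∀ (n start : Nat) (ps : Int) (d : PySem.Dict Int Int), start + n ≤ lists.length →
    addToHash lists start (start + n) ps d
      = ((prodSums ((lists.drop start).take n)).map (fun s => ps + s)).foldl
          (fun d s => d.insert s (d.getD s 0 + 1)) d := by
  intro n
  induction n with
  | zero => intro start ps d _; simp [addToHash, prodSums]
  | succ n ih =>
    intro start ps d hlen
    have hs : start < lists.length := by omega
    rw [addToHash]
    rw [if_neg (by omega)]
    rw [sub_cons lists start n hs, prodSums_cons]
    rw [List.map_flatMap, foldl_flatMap]
    have hget : lists[start]?.getD [] = lists[start] := by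
      simp [List.getElem?_eq_getElem hs]
    rw [hget]
    apply PySem.List.foldl_congr_mem
    intro acc e _
    have : start + (n + 1) = (start + 1) + n := by omega
    rw [this, ih (start + 1) (ps + e) acc (by omega)]
    simp only [List.map_map]
    have hf : (fun s => ps + e + s) = ((fun s => ps + s) ∘ fun s => e + s) := by
      funext s; simp [add_assoc]
    rw [hf]

lemma countComplements_eq (lists : List (List Int)) (d : PySem.Dict Int Int) :
    ∀ (n start : Nat) (ps : Int), start + n ≤ lists.length →
    countComplements lists start (start + n) ps d
      = ((prodSums ((lists.drop start).take n)).map (fun s => d.getD (-(ps + s)) 0)).sum := by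
  intro n
  induction n with
  | zero => intro start ps _; simp [countComplements, prodSums]
  | succ n ih =>
    intro start ps hlen
    have hs : start < lists.length := by omega
    rw [countComplements]
    rw [if_neg (by omega)]
    have hget : lists[start]?.getD [] = lists[start] := by
      simp [List.getElem?_eq_getElem hs]
    rw [hget, sub_cons lists start n hs, prodSums_cons]
    rw [List.map_flatMap, sum_flatMap']
    rw [PySem.List.foldl_add]
    rw [zero_add]
    congr 1
    apply List.map_congr_left
    intro e _
    have : start + (n + 1) = (start + 1) + n := by omega
    rw [this, ih (start + 1) (ps + e) (by omega)]
    simp only [List.map_map]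
    have hf : (fun s => d.getD (-(ps + e + s)) 0)
        = ((fun s => d.getD (-(ps + s)) 0) ∘ fun s => e + s) := by
      funext s; simp [add_assoc]
    rw [hf]

-- ===== VERDICT (by name: the statement is the Claim_ definition above) =====
theorem nSumCount_spec : Claim_equal_nSumCount := by
  intro lists _
  simp only [Spec_nSumCount, nSumCount, nSumCount_alt]
  set k := lists.length with hk
  set mid := k / 2 with hmid
  have hmidle : mid ≤ k := Nat.div_le_self _ _
  -- the hash phase builds exactly the Counter of the first half's product sums
  have h1 : addToHash lists 0 mid 0 PySem.Dict.empty
      = PySem.Dict.counter (prodSums (lists.take mid)) := by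
    have := addToHash_eq lists mid 0 0 PySem.Dict.empty (by omega)
    simp only [Nat.zero_add, List.drop_zero] at this
    rw [this]
    have : (prodSums (lists.take mid)).map (fun s => (0:Int) + s)
        = prodSums (lists.take mid) := by
      simp
    rw [this, PySem.Dict.foldl_insert_getD_add_one_eq_counter]
  rw [h1]
  -- the counting phase sums the Counter lookups over the second half's product sums
  have h2 := countComplements_eq lists (PySem.Dict.counter (prodSums (lists.take mid)))
      (k - mid) mid 0 (by omega)
  have hkm : mid + (k - mid) = k := by omega
  rw [hkm] at h2
  have hdrop : (lists.drop mid).take (k - mid) = lists.drop mid := by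
    apply List.take_of_length_le
    simp [hk]
  rw [hdrop] at h2
  rw [h2, PySem.List.foldl_add, zero_add]
  congr 1
  apply List.map_congr_left
  intro s _
  simp
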